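-- pv_equiv track=rewrite | github.com/DragonTaki/Albion-Script | attendance-bot-for-griffin-empire/botcore/ocr_utils.py | detect_columns_and_split
-- ===== SOURCE A (Python) =====
-- def detect_columns_and_split(name_regions, image_width):
--     midpoint = image_width // 2
--     left_column = []
--     right_column = []
--
--     for region in name_regions:
--         x, y, w, h = region
--         if x + w // 2 < midpoint:
--             left_column.append(region)
--         else:
--             right_column.append(region)
--
--     left_column.sort(key=lambda r: r[1])
--     right_column.sort(key=lambda r: r[1])
--     return left_column + right_column
-- ===== SOURCE B (Python) =====
-- def detect_columns_and_split(name_regions, image_width):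
--     midpoint = image_width // 2
--     left = []
--     right = []
--     for region in name_regions:
--         x, y, w, h = region
--         col = left if x + w // 2 < midpoint else right
--         i = 0
--         while i < len(col) and col[i][1] <= y:
--             i += 1
--         col.insert(i, region)
--     return left + right
-- ===== Notes on version B (the rewrite author's own statement) =====
-- stated objective: alternative
-- what changed: B never calls sort: it is an online insertion sort that, in a single pass, inserts each region directly at its y-ordered position in the appropriate column (inserting after equal y-keys to preserve input order), whereas A appends to two lists and then sorts each with the library sort.
import Mathlib
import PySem

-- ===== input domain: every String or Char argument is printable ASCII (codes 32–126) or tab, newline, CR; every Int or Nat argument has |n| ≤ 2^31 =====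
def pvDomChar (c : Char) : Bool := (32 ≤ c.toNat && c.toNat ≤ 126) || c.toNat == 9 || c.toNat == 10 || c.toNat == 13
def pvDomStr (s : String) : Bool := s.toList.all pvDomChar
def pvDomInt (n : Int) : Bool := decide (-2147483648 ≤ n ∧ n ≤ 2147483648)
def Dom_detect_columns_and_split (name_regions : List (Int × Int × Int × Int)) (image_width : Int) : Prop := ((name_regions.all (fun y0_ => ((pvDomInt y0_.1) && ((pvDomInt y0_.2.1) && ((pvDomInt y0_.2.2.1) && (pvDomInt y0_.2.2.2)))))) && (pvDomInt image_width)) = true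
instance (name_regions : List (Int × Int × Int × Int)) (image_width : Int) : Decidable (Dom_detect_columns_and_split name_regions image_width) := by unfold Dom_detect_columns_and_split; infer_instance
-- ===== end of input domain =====

-- B replaces A's two library sorts by an online insertion sort: one pass that inserts each
-- region directly at its y-ordered place in its column; alternative algorithm, same output.


-- ===== PORT A =====
def detect_columns_and_split (name_regions : List (Int × Int × Int × Int)) (image_width : Int) : List (Int × Int × Int × Int) :=
  let midpoint := PySem.Int.floordiv image_width 2
  let cols := name_regions.foldl
    (fun (cols : List (Int × Int × Int × Int) × List (Int × Int × Int × Int)) region =>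
      if region.1 + PySem.Int.floordiv region.2.2.1 2 < midpoint
      then (cols.1 ++ [region], cols.2)
      else (cols.1, cols.2 ++ [region]))
    ([], [])
  PySem.List.sorted cols.1 (fun r => r.2.1) ++ PySem.List.sorted cols.2 (fun r => r.2.1)

-- ===== PORT B =====
-- B's 'scan to the first element with strictly greater y, insert there' loop;
-- exact transcription of the while/insert in Source B.
def pvInsertY (region : Int × Int × Int × Int) : List (Int × Int × Int × Int) → List (Int × Int × Int × Int)
  | [] => [region]
  | c :: rest => if c.2.1 ≤ region.2.1 then c :: pvInsertY region rest else region :: c :: rest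

def detect_columns_and_split_alt (name_regions : List (Int × Int × Int × Int)) (image_width : Int) : List (Int × Int × Int × Int) :=
  let midpoint := PySem.Int.floordiv image_width 2
  let cols := name_regions.foldl
    (fun (cols : List (Int × Int × Int × Int) × List (Int × Int × Int × Int)) region =>
      if region.1 + PySem.Int.floordiv region.2.2.1 2 < midpoint
      then (pvInsertY region cols.1, cols.2)
      else (cols.1, pvInsertY region cols.2))
    ([], [])
  cols.1 ++ cols.2

-- ===== PRECONDITION & SPEC =====
def Spec_detect_columns_and_split (name_regions : List (Int × Int × Int × Int)) (image_width : Int) (out : List (Int × Int × Int × Int)) : Prop := out = detect_columns_and_split_alt name_regions image_width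
instance (name_regions : List (Int × Int × Int × Int)) (image_width : Int) (out : List (Int × Int × Int × Int)) : Decidable (Spec_detect_columns_and_split name_regions image_width out) := by unfold Spec_detect_columns_and_split; infer_instance

-- ===== CLAIM (what is proved, stated in full; the proofs are below) =====
def Claim_equal_detect_columns_and_split : Prop := ∀ (name_regions : List (Int × Int × Int × Int)) (image_width : Int), Dom_detect_columns_and_split name_regions image_width → Spec_detect_columns_and_split name_regions image_width (detect_columns_and_split name_regions image_width)

-- ===== LEMMAS AND PROOFS =====

-- B's hand-written insertion equals PySem's insertBy with the y-key.
theorem pvInsertY_eq_insertBy (region : Int × Int × Int × Int) (l : List (Int × Int × Int × Int)) :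
    pvInsertY region l
      = PySem.List.insertBy (fun a b => decide (a.2.1 < b.2.1)) region l := by
  induction l with
  | nil => rfl
  | cons c rest ih =>
    by_cases h : c.2.1 ≤ region.2.1
    · have h' : ¬ region.2.1 < c.2.1 := by omega
      simp [pvInsertY, PySem.List.insertBy, h, h', ih]
    · have h' : region.2.1 < c.2.1 := by omega
      simp [pvInsertY, PySem.List.insertBy, h, h']

-- A's append loop, characterised as two filters.
theorem pv_pairloop {α : Type} (p : α → Prop) [DecidablePred p] (xs : List α) (l0 r0 : List α) :
    xs.foldl (fun (cols : List α × List α) region =>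
        if p region then (cols.1 ++ [region], cols.2) else (cols.1, cols.2 ++ [region])) (l0, r0)
      = (l0 ++ xs.filter (fun r => decide (p r)), r0 ++ xs.filter (fun r => !decide (p r))) := by
  induction xs generalizing l0 r0 with
  | nil => simp
  | cons x xs ih =>
    by_cases hx : p x <;> simp [List.foldl_cons, hx, ih]

-- B's conditional-insert loop, characterised as two insertion folds over the filters.
theorem pv_splitins {α : Type} (p : α → Prop) [DecidablePred p] (ins : α → List α → List α)
    (xs : List α) (l0 r0 : List α) :
    xs.foldl (fun (cols : List α × List α) region =>
        if p region then (ins region cols.1, cols.2) else (cols.1, ins region cols.2)) (l0, r0)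
      = ((xs.filter (fun r => decide (p r))).foldl (fun acc x => ins x acc) l0,
         (xs.filter (fun r => !decide (p r))).foldl (fun acc x => ins x acc) r0) := by
  induction xs generalizing l0 r0 with
  | nil => simp
  | cons x xs ih =>
    by_cases hx : p x <;> simp [List.foldl_cons, hx, ih]

-- The insertion fold is the same whichever spelling of the insert is used.
theorem pv_foldl_ins_eq (xs : List (Int × Int × Int × Int)) (acc : List (Int × Int × Int × Int)) :
    xs.foldl (fun acc x => PySem.List.insertBy (fun a b => decide (a.2.1 < b.2.1)) x acc) acc
      = xs.foldl (fun acc x => pvInsertY x acc) acc := by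
  induction xs generalizing acc with
  | nil => rfl
  | cons x xs ih => simp only [List.foldl_cons, pvInsertY_eq_insertBy, ih]

-- ===== VERDICT (by name: the statement is the Claim_ definition above) =====
theorem detect_columns_and_split_spec : Claim_equal_detect_columns_and_split := by
  intro xs w _
  unfold Spec_detect_columns_and_split detect_columns_and_split detect_columns_and_split_alt
  simp only []
  rw [pv_pairloop, pv_splitins]
  simp only [List.nil_append]
  rw [PySem.List.sorted_eq_foldl_insertBy, PySem.List.sorted_eq_foldl_insertBy,
    pv_foldl_ins_eq, pv_foldl_ins_eq]
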